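-- pv_equiv track=rewrite | github.com/JoWide/AdventofCode2023 | AoC_2023_day1.py | firstnum
-- ===== SOURCE A (Python) =====
-- def firstnum (mystring, patterns):
--     wordIndex = 0
--     lowIndex = len(mystring)+1
--     firstWordnr = len(patterns.split('|'))+1
--     words = patterns.split('|')
--     for word in words:
--         thisIndex = mystring.find (word)
--         if thisIndex >= 0 and thisIndex < lowIndex:
--             lowIndex = thisIndex
--             firstWordnr = wordIndex
--         wordIndex += 1
--     w = words[0]
--     if w == '1':
--         return firstWordnr % 10 + 1
--     else:
--         return (len(words) - firstWordnr) % 10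
-- ===== SOURCE B (Python) =====
-- def firstnum(mystring, patterns):
--     words = patterns.split('|')
--     n = len(words)
--     firstWordnr = next(
--         (j for i in range(len(mystring) + 1)
--            for j, word in enumerate(words)
--            if mystring.startswith(word, i)),
--         n + 1)
--     if words[0] == '1':
--         return firstWordnr % 10 + 1
--     return (n - firstWordnr) % 10
-- ===== Notes on version B (the rewrite author's own statement) =====
-- stated objective: alternative
-- what changed: Replaces the per-word find() minimisation loop (tracking lowIndex/firstWordnr state) by a single left-to-right scan over character positions that returns the first (position, word-index) pair where a word starts, expressed as a generator with next().
import Mathlib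
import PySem

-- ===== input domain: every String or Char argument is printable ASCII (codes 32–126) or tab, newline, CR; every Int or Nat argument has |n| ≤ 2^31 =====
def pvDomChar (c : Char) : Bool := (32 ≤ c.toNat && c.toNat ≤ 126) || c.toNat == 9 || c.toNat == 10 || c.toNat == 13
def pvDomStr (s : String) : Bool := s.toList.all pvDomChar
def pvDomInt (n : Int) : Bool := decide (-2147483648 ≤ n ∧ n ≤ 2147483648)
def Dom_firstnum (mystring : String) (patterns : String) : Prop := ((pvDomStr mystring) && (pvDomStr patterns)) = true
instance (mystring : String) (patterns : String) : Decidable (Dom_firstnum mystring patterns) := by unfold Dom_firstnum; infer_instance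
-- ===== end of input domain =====

-- B replaces A's per-word find() minimisation loop by a single left-to-right scan over
-- character positions that returns the first (position, word-index) match; same results, similar cost.

-- ===== PORT A =====
-- the loop body of A (state = (wordIndex, lowIndex, firstWordnr))
def firstnumStep (mystring : String) (st : Int × Int × Int) (word : String) : Int × Int × Int :=
  let thisIndex := PySem.Str.find mystring word
  if 0 ≤ thisIndex ∧ thisIndex < st.2.1 then (st.1 + 1, thisIndex, st.1)
  else (st.1 + 1, st.2.1, st.2.2)

def firstnum (mystring : String) (patterns : String) : Int :=
  let words : List String := (PySem.Str.split? patterns "|").getD []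
  let st := words.foldl (firstnumStep mystring)
    (0, PySem.Str.len mystring + 1, (words.length : Int) + 1)
  let firstWordnr := st.2.2
  -- words[0]: split never returns [], so the IndexError default "" is unreachable
  let w := (PySem.List.pyGet? words 0).getD ""
  if w == "1" then PySem.Int.mod firstWordnr 10 + 1
  else PySem.Int.mod ((words.length : Int) - firstWordnr) 10

-- ===== PORT B =====
-- mystring.startswith(word, i) with 0 ≤ i is exactly a prefix test on the drop at i
def firstnum_alt (mystring : String) (patterns : String) : Int :=
  let words : List String := (PySem.Str.split? patterns "|").getD []
  let n : Int := words.length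
  let s := mystring.toList
  let firstWordnr : Int :=
    match ((List.range (s.length + 1)).findSome? (fun i =>
      words.zipIdx.findSome? (fun wj =>
        if PySem.Chars.startswith (s.drop i) wj.1.toList then some wj.2 else none)) : Option Nat) with
    | some j => (j : Int)
    | none => n + 1
  if (PySem.List.pyGet? words 0).getD "" == "1" then PySem.Int.mod firstWordnr 10 + 1
  else PySem.Int.mod (n - firstWordnr) 10

-- ===== PRECONDITION & SPEC =====
def Spec_firstnum (mystring : String) (patterns : String) (out : Int) : Prop := out = firstnum_alt mystring patterns
instance (mystring : String) (patterns : String) (out : Int) : Decidable (Spec_firstnum mystring patterns out) := by unfold Spec_firstnum; infer_instance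

-- ===== CLAIM (what is proved, stated in full; the proofs are below) =====
def Claim_equal_firstnum : Prop := ∀ (mystring : String) (patterns : String), Dom_firstnum mystring patterns → Spec_firstnum mystring patterns (firstnum mystring patterns)

-- ===== LEMMAS AND PROOFS =====

-- first-minimum search over the words, bounded by `low`: the pair (index, find-value)
-- of the first word whose find-result is the strictly smallest one below `low`
def bestFrom (mystring : String) : List String → Int → Option (Nat × Int)
  | [], _ => none
  | w :: ws, low =>
    let t := PySem.Str.find mystring w
    if 0 ≤ t ∧ t < low then
      match bestFrom mystring ws t with
      | none => some (0, t)
      | some (j, t') => some (j + 1, t')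
    else
      (bestFrom mystring ws low).map (fun p => (p.1 + 1, p.2))

theorem foldA_eq (mystring : String) (ws : List String) :
    ∀ (k low fw : Int),
    ws.foldl (firstnumStep mystring) (k, low, fw) =
      (k + (ws.length : Int),
        match bestFrom mystring ws low with
        | some (j, t) => (t, k + (j : Int))
        | none => (low, fw)) := by
  induction ws with
  | nil => intro k low fw; simp [bestFrom]
  | cons w ws ih =>
    intro k low fw
    simp only [List.foldl_cons, firstnumStep, bestFrom]
    by_cases h : 0 ≤ PySem.Str.find mystring w ∧ PySem.Str.find mystring w < low
    · rw [if_pos h, if_pos h, ih]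
      rcases hb : bestFrom mystring ws (PySem.Str.find mystring w) with _ | ⟨j, t⟩ <;>
        simp only [Prod.mk.injEq, List.length_cons] <;>
        first | trivial | (refine ⟨?_, ?_, ?_⟩ <;> push_cast <;> omega)
    · rw [if_neg h, if_neg h, ih]
      rcases hb : bestFrom mystring ws low with _ | ⟨j, t⟩ <;>
        simp only [Option.map_some, Option.map_none, Prod.mk.injEq, List.length_cons] <;>
        first | trivial | (refine ⟨?_, ?_, ?_⟩ <;> push_cast <;> omega) | (refine ⟨?_, ?_⟩ <;> first | trivial | (push_cast; omega))

theorem bestFrom_none (mystring : String) (ws : List String) : ∀ (low : Int),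
    bestFrom mystring ws low = none →
    ∀ w ∈ ws, ¬ (0 ≤ PySem.Chars.find mystring.toList w.toList ∧
      PySem.Chars.find mystring.toList w.toList < low) := by
  induction ws with
  | nil => simp
  | cons w ws ih =>
    intro low h
    simp only [bestFrom, PySem.Str.find_eq] at h
    by_cases hc : 0 ≤ PySem.Chars.find mystring.toList w.toList ∧
        PySem.Chars.find mystring.toList w.toList < low
    · rw [if_pos hc] at h
      rcases hb : bestFrom mystring ws (PySem.Chars.find mystring.toList w.toList) with _ | p <;>
        rw [hb] at h <;> simp at h
    · rw [if_neg hc] at h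
      intro u hu
      rcases List.mem_cons.mp hu with hu | hu
      · subst hu; exact hc
      · exact ih low (by simpa using h) u hu

theorem bestFrom_some (mystring : String) (ws : List String) : ∀ (low : Int) (j : Nat) (t : Int),
    bestFrom mystring ws low = some (j, t) →
    j < ws.length ∧ PySem.Chars.find mystring.toList (ws.getD j "").toList = t ∧ 0 ≤ t ∧ t < low ∧
      (∀ w ∈ ws, 0 ≤ PySem.Chars.find mystring.toList w.toList →
        PySem.Chars.find mystring.toList w.toList < low →
        t ≤ PySem.Chars.find mystring.toList w.toList) ∧
      (∀ j' < j, ¬ (0 ≤ PySem.Chars.find mystring.toList (ws.getD j' "").toList ∧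
        PySem.Chars.find mystring.toList (ws.getD j' "").toList ≤ t)) := by
  induction ws with
  | nil => simp [bestFrom]
  | cons w ws ih =>
    intro low j t h
    simp only [bestFrom, PySem.Str.find_eq] at h
    by_cases hc : 0 ≤ PySem.Chars.find mystring.toList w.toList ∧
        PySem.Chars.find mystring.toList w.toList < low
    · rw [if_pos hc] at h
      rcases hb : bestFrom mystring ws (PySem.Chars.find mystring.toList w.toList) with _ | ⟨j0, t0⟩
      · rw [hb] at h
        obtain ⟨hj, ht⟩ : (0 : Nat) = j ∧ PySem.Chars.find mystring.toList w.toList = t := by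
          simpa using h
        subst hj
        have hn := bestFrom_none mystring ws _ hb
        refine ⟨by simp, by simpa using ht, by omega, by omega, ?_, by omega⟩
        intro u hu h0 hlow
        rcases List.mem_cons.mp hu with hu | hu
        · subst hu; omega
        · have := hn u hu; omega
      · rw [hb] at h
        obtain ⟨hj, ht⟩ : j0 + 1 = j ∧ t0 = t := by simpa using h
        subst hj; subst ht
        obtain ⟨h1, h2, h3, h4, h5, h6⟩ := ih _ _ _ hb
        refine ⟨by simpa using h1, by simpa using h2, h3, by omega, ?_, ?_⟩
        · intro u hu h0 hlow
          rcases List.mem_cons.mp hu with hu | hu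
          · subst hu; omega
          · by_cases hul : PySem.Chars.find mystring.toList u.toList <
                PySem.Chars.find mystring.toList w.toList
            · exact h5 u hu h0 hul
            · omega
        · intro j' hj'
          rcases j' with _ | j'
          · simpa using fun _ => by omega
          · simpa using h6 j' (by omega)
    · rw [if_neg hc] at h
      rcases hb : bestFrom mystring ws low with _ | ⟨j0, t0⟩
      · rw [hb] at h; simp at h
      · rw [hb] at h
        obtain ⟨hj, ht⟩ : j0 + 1 = j ∧ t0 = t := by simpa using h
        subst hj; subst ht
        obtain ⟨h1, h2, h3, h4, h5, h6⟩ := ih _ _ _ hb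
        refine ⟨by simpa using h1, by simpa using h2, h3, h4, ?_, ?_⟩
        · intro u hu h0 hlow
          rcases List.mem_cons.mp hu with hu | hu
          · subst hu; exact absurd ⟨h0, hlow⟩ hc
          · exact h5 u hu h0 hlow
        · intro j' hj'
          rcases j' with _ | j'
          · intro hcon
            rcases hcon with ⟨h0, hle⟩
            simp only [List.getD_cons_zero] at h0 hle
            exact hc ⟨h0, by omega⟩
          · simpa using h6 j' (by omega)

theorem inner_none (d : List Char) (ws : List String) : ∀ (k : Nat),
    (∀ w ∈ ws, PySem.Chars.startswith d w.toList = false) →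
    (ws.zipIdx k).findSome? (fun wj =>
      if PySem.Chars.startswith d wj.1.toList then some wj.2 else none) = none := by
  induction ws with
  | nil => simp
  | cons w ws ih =>
    intro k h
    simp only [List.zipIdx_cons, List.findSome?_cons]
    rw [h w (by simp)]
    simpa using ih (k + 1) (fun u hu => h u (by simp [hu]))

theorem inner_some (d : List Char) (ws : List String) : ∀ (k j : Nat),
    j < ws.length →
    PySem.Chars.startswith d (ws.getD j "").toList = true →
    (∀ j' < j, PySem.Chars.startswith d (ws.getD j' "").toList = false) →
    (ws.zipIdx k).findSome? (fun wj =>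
      if PySem.Chars.startswith d wj.1.toList then some wj.2 else none) = some (k + j) := by
  induction ws with
  | nil => simp
  | cons w ws ih =>
    intro k j hj hpre hfst
    simp only [List.zipIdx_cons, List.findSome?_cons]
    rcases j with _ | j
    · simp only [List.getD_cons_zero] at hpre
      rw [hpre]
      simp
    · have h0 : PySem.Chars.startswith d w.toList = false := by
        simpa using hfst 0 (by omega)
      rw [h0]
      simp only [Bool.false_eq_true, if_false]
      have := ih (k + 1) j (by simpa using hj) (by simpa using hpre)
        (fun j' hj' => by simpa using hfst (j' + 1) (by omega))
      rw [this]
      congr 1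
      omega

theorem range_findSome?_none {α : Type} (f : Nat → Option α) (n : Nat)
    (h : ∀ i < n, f i = none) : (List.range n).findSome? f = none := by
  rw [List.findSome?_eq_none_iff]
  intro i hi
  exact h i (List.mem_range.mp hi)

theorem range_findSome?_some {α : Type} (f : Nat → Option α) (n m : Nat) (v : α)
    (hm : m < n) (hv : f m = some v) (hnone : ∀ i < m, f i = none) :
    (List.range n).findSome? f = some v := by
  have hsplit : n = (m + 1) + (n - (m + 1)) := by omega
  rw [hsplit, List.range_add, List.findSome?_append, List.range_succ,
    List.findSome?_append, range_findSome?_none f m hnone]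
  simp [hv]

-- an occurrence of w at position i bounds find from above (and makes it nonnegative)
theorem find_le_of_prefix_drop (s w : List Char) (i : Nat) (h : w <+: s.drop i) :
    0 ≤ PySem.Chars.find s w ∧ PySem.Chars.find s w ≤ (i : Int) := by
  have hinf : w <:+: s := h.isInfix.trans (List.drop_suffix i s).isInfix
  have h0 : 0 ≤ PySem.Chars.find s w := (PySem.Chars.find_nonneg_iff s w).mpr hinf
  refine ⟨h0, ?_⟩
  by_contra hlt
  push Not at hlt
  exact (PySem.Chars.find_spec h0).2 i (by omega) h

theorem scan_eq_best (mystring : String) (ws : List String) :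
    (List.range (mystring.toList.length + 1)).findSome? (fun i =>
      ws.zipIdx.findSome? (fun wj =>
        if PySem.Chars.startswith (mystring.toList.drop i) wj.1.toList then some wj.2 else none)) =
    (bestFrom mystring ws ((mystring.toList.length : Int) + 1)).map Prod.fst := by
  rcases hb : bestFrom mystring ws ((mystring.toList.length : Int) + 1) with _ | ⟨j, t⟩
  · have hn := bestFrom_none mystring ws _ hb
    rw [Option.map_none]
    apply range_findSome?_none
    intro i _
    apply inner_none
    intro w hw
    have hw' := hn w hw
    have hle := PySem.Chars.find_le_length mystring.toList w.toList
    have hneg : ¬ (0 ≤ PySem.Chars.find mystring.toList w.toList) := by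
      intro h0; exact hw' ⟨h0, by omega⟩
    rw [Bool.eq_false_iff]
    intro hsw
    have hpre := (PySem.Chars.startswith_iff _ _).mp hsw
    exact hneg (find_le_of_prefix_drop mystring.toList w.toList i hpre).1
  · obtain ⟨h1, h2, h3, h4, h5, h6⟩ := bestFrom_some mystring ws _ _ _ hb
    rw [Option.map_some]
    have hjt : PySem.Chars.find mystring.toList (ws.getD j "").toList = t := h2
    have htL : t ≤ (mystring.toList.length : Int) := by
      have := PySem.Chars.find_le_length mystring.toList (ws.getD j "").toList; omega
    apply range_findSome?_some _ _ t.toNat j (by omega)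
    · have hj0 : (0 : Nat) + j = j := by omega
      rw [← hj0]
      apply inner_some
      · exact h1
      · rw [PySem.Chars.startswith_iff]
        have := (PySem.Chars.find_spec (by omega : 0 ≤ PySem.Chars.find mystring.toList (ws.getD j "").toList)).1
        rwa [hjt] at this
      · intro j' hj'
        rw [Bool.eq_false_iff]
        intro hsw
        have hpre := (PySem.Chars.startswith_iff _ _).mp hsw
        have hf := find_le_of_prefix_drop mystring.toList (ws.getD j' "").toList t.toNat hpre
        exact h6 j' hj' ⟨hf.1, by omega⟩
    · intro i hi
      apply inner_none
      intro w hw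
      rw [Bool.eq_false_iff]
      intro hsw
      have hpre := (PySem.Chars.startswith_iff _ _).mp hsw
      have hf := find_le_of_prefix_drop mystring.toList w.toList i hpre
      have := h5 w hw hf.1 (by omega)
      omega

theorem firstnum_spec' (mystring patterns : String) :
    firstnum mystring patterns = firstnum_alt mystring patterns := by
  have hlen : PySem.Str.len mystring = (mystring.toList.length : Int) := by
    simp [PySem.Str.len]
  simp only [firstnum, firstnum_alt, hlen, foldA_eq]
  rw [scan_eq_best]
  rcases hb : bestFrom mystring ((PySem.Str.split? patterns "|").getD [])
      ((mystring.toList.length : Int) + 1) with _ | ⟨j, t⟩ <;> simp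

-- ===== VERDICT (by name: the statement is the Claim_ definition above) =====
theorem firstnum_spec : Claim_equal_firstnum := by
  intro mystring patterns _
  unfold Spec_firstnum
  exact firstnum_spec' mystring patterns
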